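-- pv_equiv track=rewrite | github.com/SebinYu-hub/PS2 | solution/1.구현/04.py | solution
-- ===== SOURCE A (Python) =====
-- def solution(answers):
--     patterns = [
--         [1, 2, 3, 4, 5],                    # 패턴 1: [1,2,3,4,5,1,2,3,4,5,...]
--         [2, 1, 2, 3, 2, 4, 2, 5],          # 패턴 2: [2,1,2,3,2,4,2,5,2,1,...]
--         [3, 3, 1, 1, 2, 2, 4, 4, 5, 5]     # 패턴 3: [3,3,1,1,2,2,4,4,5,5,...]
--     ]
--
--     # 각 수포자별 점수 계산 - list comprehension 활용
--     scores = [sum(1 for i, ans in enumerate(answers) if ans == pattern[i % len(pattern)])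
--              for pattern in patterns]
--     # 예: answers = [1,2,3,4,5]일 때
--     # scores = [5, 0, 0] (첫 번째 수포자만 모두 맞힘)
--
--     # 최고 점수와 동일한 점수를 받은 수포자 번호 반환
--     max_score = max(scores)  # 5
--     return [i + 1 for i, score in enumerate(scores) if score == max_score]  # [1]
-- ===== SOURCE B (Python) =====
-- def solution(answers):
--     patterns = [
--         [1, 2, 3, 4, 5],
--         [2, 1, 2, 3, 2, 4, 2, 5],
--         [3, 3, 1, 1, 2, 2, 4, 4, 5, 5],
--     ]
--     # All three patterns repeat with period dividing 40 (lcm(5, 8, 10) = 40).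
--     # Bucket the answers once into a histogram keyed by (position mod 40, value);
--     # each student's score is then 40 histogram lookups, independent of len(answers).
--     hist = {}
--     for i, ans in enumerate(answers):
--         key = (i % 40, ans)
--         hist[key] = hist.get(key, 0) + 1
--     scores = [sum(hist.get((r, p[r % len(p)]), 0) for r in range(40)) for p in patterns]
--     best = max(scores)
--     return [k + 1 for k in range(3) if scores[k] == best]
-- ===== Notes on version B (the rewrite author's own statement) =====
-- stated objective: alternative
-- what changed: B replaces A's per-pattern scan comparing every answer against a cyclic pattern by a residue-class histogram: one pass buckets answers by (index mod 40, value) into a dict (40 = lcm of the pattern periods), and each score is then a fixed sum of 40 histogram lookups.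
import Mathlib
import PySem

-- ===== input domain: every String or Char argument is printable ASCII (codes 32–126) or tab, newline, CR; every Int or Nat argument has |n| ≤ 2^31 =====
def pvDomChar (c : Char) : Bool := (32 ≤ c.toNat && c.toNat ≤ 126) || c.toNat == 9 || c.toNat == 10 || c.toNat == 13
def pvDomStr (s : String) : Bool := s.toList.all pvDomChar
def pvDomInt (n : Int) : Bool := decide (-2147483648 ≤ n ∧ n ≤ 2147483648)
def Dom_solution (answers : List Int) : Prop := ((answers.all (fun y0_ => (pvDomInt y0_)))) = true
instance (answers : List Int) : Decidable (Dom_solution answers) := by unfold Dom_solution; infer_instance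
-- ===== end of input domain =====

-- B buckets the answers once into a histogram keyed by (index mod 40, value) — 40 = lcm of the
-- three pattern periods — and reads each score off as 40 histogram lookups (objective: alternative).

-- ===== PORT A =====
-- score of one pattern: sum(1 for i, ans in enumerate(answers) if ans == pattern[i % len(pattern)])
def patternScore (pattern : List Int) (answers : List Int) : Int :=
  (PySem.List.enumerate answers).foldl
    (fun acc p => if p.2 = PySem.List.pyGetD pattern (PySem.Int.mod p.1 (pattern.length : Int)) 0 then acc + 1 else acc) 0

def solution (answers : List Int) : List Int :=
  let patterns : List (List Int) := [[1,2,3,4,5], [2,1,2,3,2,4,2,5], [3,3,1,1,2,2,4,4,5,5]]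
  let scores := patterns.map (fun pattern => patternScore pattern answers)
  let maxScore := (PySem.List.max? scores (fun x => x)).getD 0
  (PySem.List.enumerate scores).filterMap (fun p => if p.2 = maxScore then some (p.1 + 1) else none)

-- ===== PORT B =====
def solution_alt (answers : List Int) : List Int :=
  let patterns : List (List Int) := [[1,2,3,4,5], [2,1,2,3,2,4,2,5], [3,3,1,1,2,2,4,4,5,5]]
  let hist := (PySem.List.enumerate answers).foldl
    (fun (d : PySem.Dict (Int × Int) Int) p =>
      d.insert (PySem.Int.mod p.1 40, p.2) (d.getD (PySem.Int.mod p.1 40, p.2) 0 + 1))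
    PySem.Dict.empty
  let scores := patterns.map (fun p =>
    ((PySem.List.pyRange 0 40 1).map
      (fun r => hist.getD (r, PySem.List.pyGetD p (PySem.Int.mod r (p.length : Int)) 0) 0)).sum)
  let best := (PySem.List.max? scores (fun x => x)).getD 0
  (PySem.List.pyRange 0 3 1).filterMap
    (fun k => if PySem.List.pyGetD scores k 0 = best then some (k + 1) else none)

-- ===== PRECONDITION & SPEC =====
def Spec_solution (answers : List Int) (out : List Int) : Prop := out = solution_alt answers
instance (answers : List Int) (out : List Int) : Decidable (Spec_solution answers out) := by unfold Spec_solution; infer_instance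

-- ===== CLAIM (what is proved, stated in full; the proofs are below) =====
def Claim_equal_solution : Prop := ∀ (answers : List Int), Dom_solution answers → Spec_solution answers (solution answers)

-- ===== LEMMAS AND PROOFS =====

-- sum over a duplicate-free list of an indicator picking the single r with (r, pat r) = x
theorem ind_sum (l : List Int) (hnd : l.Nodup) (x : Int × Int) (pat : Int → Int) :
    (l.map (fun r => if (r, pat r) = x then (1 : Int) else 0)).sum
      = if x.1 ∈ l ∧ x.2 = pat x.1 then 1 else 0 := by
  obtain ⟨x1, x2⟩ := x
  induction l with
  | nil => simp
  | cons r t ih =>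
    obtain ⟨hrt, hnt⟩ := List.nodup_cons.mp hnd
    simp only [List.map_cons, List.sum_cons, ih hnt, List.mem_cons]
    by_cases h1 : x1 = r
    · subst h1
      by_cases h2 : x2 = pat x1
      · simp [h2, hrt]
      · simp [h2, hrt, Prod.mk.injEq, Ne.symm h2]
    · simp [Prod.mk.injEq, h1, Ne.symm h1]

-- splitting a countP over the list into 40 residue-class counts
theorem sum_count (m : List (Int × Int)) (pat : Int → Int)
    (hm : ∀ x ∈ m, 0 ≤ x.1 ∧ x.1 < 40) :
    ((PySem.List.pyRange 0 40 1).map (fun r => ((m.count (r, pat r) : Nat) : Int))).sum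
      = (m.countP (fun x => decide (x.2 = pat x.1)) : Int) := by
  induction m with
  | nil => simp
  | cons x t ih =>
    have hx := hm x (List.mem_cons_self ..)
    have ht : ∀ y ∈ t, 0 ≤ y.1 ∧ y.1 < 40 := fun y hy => hm y (List.mem_cons_of_mem _ hy)
    have hmem : x.1 ∈ PySem.List.pyRange 0 40 1 :=
      (PySem.List.mem_pyRange_one).mpr ⟨hx.1, hx.2⟩
    have hnd : (PySem.List.pyRange 0 40 1).Nodup := by decide
    simp only [List.count_cons, List.countP_cons]
    have hfun : (fun r => (((t.count (r, pat r) + if x == (r, pat r) then 1 else 0 : Nat)) : Int))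
        = (fun r => ((t.count (r, pat r) : Nat) : Int) + (if (r, pat r) = x then (1 : Int) else 0)) := by
      funext r
      simp only [beq_iff_eq]
      push_cast
      by_cases h : (r, pat r) = x
      · rw [if_pos h.symm, if_pos h]
      · rw [if_neg (Ne.symm h), if_neg h]
    rw [hfun, PySem.List.sum_map_add_int, ih ht, ind_sum _ hnd x pat]
    push_cast
    by_cases h : x.2 = pat x.1 <;> simp [h, hmem]

-- mod 40 then mod L is mod L when L divides 40
theorem modmod (a L : Int) (hL : 0 < L) (hdvd : L ∣ 40) :
    PySem.Int.mod (PySem.Int.mod a 40) L = PySem.Int.mod a L := by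
  rw [PySem.Int.mod_eq_emod_of_pos hL, PySem.Int.mod_eq_emod_of_pos hL,
      PySem.Int.mod_eq_emod_of_pos (show (0:Int) < 40 by norm_num)]
  exact Int.emod_emod_of_dvd a hdvd

-- B's histogram score for one pattern equals A's fold score
theorem score_eq (P : List Int) (hL : 0 < (P.length : Int)) (hdvd : (P.length : Int) ∣ 40)
    (answers : List Int) :
    ((PySem.List.pyRange 0 40 1).map
        (fun r =>
          (((PySem.List.enumerate answers).foldl
              (fun (d : PySem.Dict (Int × Int) Int) p =>
                d.insert (PySem.Int.mod p.1 40, p.2) (d.getD (PySem.Int.mod p.1 40, p.2) 0 + 1))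
              PySem.Dict.empty).getD
            (r, PySem.List.pyGetD P (PySem.Int.mod r (P.length : Int)) 0) 0))).sum
      = patternScore P answers := by
  have hfold :
      (PySem.List.enumerate answers).foldl
          (fun (d : PySem.Dict (Int × Int) Int) p =>
            d.insert (PySem.Int.mod p.1 40, p.2) (d.getD (PySem.Int.mod p.1 40, p.2) 0 + 1))
          PySem.Dict.empty
        = ((PySem.List.enumerate answers).map (fun p => (PySem.Int.mod p.1 40, p.2))).foldl
            (fun (d : PySem.Dict (Int × Int) Int) x => d.insert x (d.getD x 0 + 1))
            PySem.Dict.empty := by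
    rw [List.foldl_map]
  rw [hfold]
  have hget : ∀ v : Int × Int,
      (((PySem.List.enumerate answers).map (fun p => (PySem.Int.mod p.1 40, p.2))).foldl
          (fun (d : PySem.Dict (Int × Int) Int) x => d.insert x (d.getD x 0 + 1))
          PySem.Dict.empty).getD v 0
        = (((PySem.List.enumerate answers).map (fun p => (PySem.Int.mod p.1 40, p.2))).count v : Int) := by
    intro v
    rw [PySem.Dict.getD_foldl_insert_add_one]
    simp [PySem.Dict.getD_empty]
  simp only [hget]
  have hm : ∀ x ∈ (PySem.List.enumerate answers).map (fun p => (PySem.Int.mod p.1 40, p.2)),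
      0 ≤ x.1 ∧ x.1 < 40 := by
    intro x hx
    rcases List.mem_map.mp hx with ⟨p, _, rfl⟩
    exact ⟨PySem.Int.mod_nonneg _ (by norm_num), PySem.Int.mod_lt _ (by norm_num)⟩
  rw [sum_count _ (fun r => PySem.List.pyGetD P (PySem.Int.mod r (P.length : Int)) 0) hm]
  rw [List.countP_map]
  unfold patternScore
  rw [PySem.List.foldl_ite_add_one]
  rw [zero_add]
  congr 1
  apply List.countP_congr
  intro p _
  simp only [Function.comp_apply, decide_eq_true_eq]
  rw [modmod p.1 (P.length : Int) hL hdvd]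

-- the two post-processing phases agree on any three scores x y z
theorem tail_eq (x y z : Int) :
    (PySem.List.enumerate [x, y, z]).filterMap
      (fun p => if p.2 = (PySem.List.max? [x, y, z] (fun v => v)).getD 0 then some (p.1 + 1) else none)
    = (PySem.List.pyRange 0 3 1).filterMap
        (fun k => if PySem.List.pyGetD [x, y, z] k 0 = (PySem.List.max? [x, y, z] (fun v => v)).getD 0
                  then some (k + 1) else none) := by
  have h3 : PySem.List.pyRange 0 3 1 = [0, 1, 2] := by decide
  rw [h3]
  norm_num [PySem.List.enumerate_cons, PySem.List.enumerate_nil, List.filterMap_cons,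
    PySem.List.pyGetD_ofNat', List.getD]

theorem solution_eq_alt (answers : List Int) : solution answers = solution_alt answers := by
  unfold solution solution_alt
  simp only [List.map]
  simp only [score_eq [1,2,3,4,5] (by norm_num) (by norm_num) answers,
      score_eq [2,1,2,3,2,4,2,5] (by norm_num) (by norm_num) answers,
      score_eq [3,3,1,1,2,2,4,4,5,5] (by norm_num) (by norm_num) answers]
  exact tail_eq _ _ _

-- ===== VERDICT (by name: the statement is the Claim_ definition above) =====
theorem solution_spec : Claim_equal_solution := by
  intro answers _
  unfold Spec_solution
  exact solution_eq_alt answers
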